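-- pv_equiv track=rewrite | github.com/MrBrantCode/unitest_baseline | mut_generate/mist_train_cf/cf_13527/solution.py | find_max_occurrence
-- ===== SOURCE A (Python) =====
-- def find_max_occurrence(s):
--     # Remove special characters and whitespaces
--     s = ''.join(c.lower() for c in s if c.isalnum())
--
--     # Count the occurrences of each character
--     char_counts = {}
--     for i, c in enumerate(s):
--         if c in char_counts:
--             char_counts[c] += 1
--         else:
--             char_counts[c] = 1
--
--     # Find the character with maximum occurrence
--     max_occurrence = 0
--     max_char = None
--     for c, count in char_counts.items():
--         if count > max_occurrence:
--             max_occurrence = count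
--             max_char = c
--
--     # Find the index of the character that appears first in the string
--     max_index = None
--     for i, c in enumerate(s):
--         if c == max_char:
--             max_index = i
--             break
--
--     return max_index
-- ===== SOURCE B (Python) =====
-- def find_max_occurrence(s):
--     # Single pass: build char -> [count, first_index] over the filtered stream,
--     # then one selection pass over the table (strict '>' keeps first-appearance ties).
--     table = {}
--     i = 0
--     for c in s:
--         if c.isalnum():
--             ch = c.lower()
--             if ch in table:
--                 table[ch][0] += 1
--             else:
--                 table[ch] = [1, i]
--             i += 1
--     best = None
--     for cnt, idx in table.values():
--         if best is None or cnt > best[0]: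
--             best = (cnt, idx)
--     return None if best is None else best[1]
-- ===== Notes on version B (the rewrite author's own statement) =====
-- stated objective: alternative
-- what changed: B replaces A's three scans (build a count dict, select the max, then rescan the string for the first index) with one pass that records (count, first_index) per char in a single table plus one selection pass over the table values.
import Mathlib
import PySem

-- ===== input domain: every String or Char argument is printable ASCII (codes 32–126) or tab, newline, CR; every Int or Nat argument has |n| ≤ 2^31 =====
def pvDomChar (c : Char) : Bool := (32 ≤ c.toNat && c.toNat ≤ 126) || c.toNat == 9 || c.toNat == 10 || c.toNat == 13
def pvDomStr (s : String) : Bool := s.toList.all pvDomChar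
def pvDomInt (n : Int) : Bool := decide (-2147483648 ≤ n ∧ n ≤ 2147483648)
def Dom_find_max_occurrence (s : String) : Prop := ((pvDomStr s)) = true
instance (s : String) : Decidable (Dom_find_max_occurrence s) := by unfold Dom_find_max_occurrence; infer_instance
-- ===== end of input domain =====

-- B builds one char -> (count, first_index) table in a single pass over s and selects from it,
-- folding A's separate counting and index-finding scans into one pass (objective: alternative decomposition).

-- ===== PORT A =====
-- A's third loop: 'for i, c in enumerate(s): if c == max_char: max_index = i; break'
def pvFindIdxA : List Char → Option Char → Int → Option Int
  | [], _, _ => none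
  | c :: rest, mc, i => if some c == mc then some i else pvFindIdxA rest mc (i + 1)

def find_max_occurrence (s : String) : Option Int :=
  -- s = ''.join(c.lower() for c in s if c.isalnum())
  let t : List Char := (s.toList.filter (fun c => PySem.Chars.isalnum c)).map PySem.Chars.lowerChar
  -- char_counts loop
  let cc : PySem.Dict Char Int :=
    (PySem.List.enumerate t).foldl
      (fun d p =>
        if d.contains p.2 then d.insert p.2 (d.getD p.2 0 + 1) else d.insert p.2 1)
      PySem.Dict.empty
  -- max-occurrence selection loop
  let sel : Int × Option Char :=
    cc.items.foldl (fun st p => if p.2 > st.1 then (p.2, some p.1) else st) (0, none)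
  -- first-index loop
  pvFindIdxA t sel.2 0

-- ===== PORT B =====
def find_max_occurrence_alt (s : String) : Option Int :=
  let tbl : PySem.Dict Char (Int × Int) :=
    (s.toList.foldl
      (fun (st : PySem.Dict Char (Int × Int) × Int) c =>
        if PySem.Chars.isalnum c then
          let ch := PySem.Chars.lowerChar c
          (if st.1.contains ch then st.1.modify ch (0, 0) (fun p => (p.1 + 1, p.2))
           else st.1.insert ch (1, st.2), st.2 + 1)
        else st)
      (PySem.Dict.empty, 0)).1
  let best : Option (Int × Int) :=
    tbl.values.foldl
      (fun b p => match b with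
        | none => some p
        | some q => if p.1 > q.1 then some p else b)
      none
  best.map (·.2)

-- ===== PRECONDITION & SPEC =====
def Spec_find_max_occurrence (s : String) (out : Option Int) : Prop := out = find_max_occurrence_alt s
instance (s : String) (out : Option Int) : Decidable (Spec_find_max_occurrence s out) := by unfold Spec_find_max_occurrence; infer_instance

-- ===== CLAIM (what is proved, stated in full; the proofs are below) =====
def Claim_equal_find_max_occurrence : Prop := ∀ (s : String), Dom_find_max_occurrence s → Spec_find_max_occurrence s (find_max_occurrence s)

-- ===== LEMMAS AND PROOFS =====

-- the filtered lowercased stream both programs work on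
def pvFilt (l : List Char) : List Char :=
  (l.filter (fun c => PySem.Chars.isalnum c)).map PySem.Chars.lowerChar

-- B's per-character step (definitionally the lambda in find_max_occurrence_alt)
def pvBStep (st : PySem.Dict Char (Int × Int) × Int) (c : Char) : PySem.Dict Char (Int × Int) × Int :=
  if PySem.Chars.isalnum c then
    let ch := PySem.Chars.lowerChar c
    (if st.1.contains ch then st.1.modify ch (0, 0) (fun p => (p.1 + 1, p.2))
     else st.1.insert ch (1, st.2), st.2 + 1)
  else st

lemma pvFilt_append_singleton (l : List Char) (c : Char) :
    pvFilt (l ++ [c]) =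
      pvFilt l ++ (if PySem.Chars.isalnum c then [PySem.Chars.lowerChar c] else []) := by
  by_cases h : PySem.Chars.isalnum c <;> simp [pvFilt, List.filter_append, h]

lemma pvBfold_spec (l : List Char) :
    (l.foldl pvBStep (PySem.Dict.empty, 0)).2 = ((pvFilt l).length : Int) ∧
    (l.foldl pvBStep (PySem.Dict.empty, 0)).1.keys = PySem.Set.ofList (pvFilt l) ∧
    ∀ k ∈ pvFilt l,
      (l.foldl pvBStep (PySem.Dict.empty, 0)).1.getD k (0, 0) =
        (((pvFilt l).count k : Int), ((pvFilt l).idxOf k : Int)) := by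
  induction l using List.reverseRecOn with
  | nil => simp [pvFilt, PySem.Dict.keys_empty, PySem.Set.ofList_nil]
  | append_singleton l c ih =>
    obtain ⟨hi, hkeys, hget⟩ := ih
    rw [List.foldl_append]
    simp only [List.foldl_cons, List.foldl_nil]
    by_cases hal : PySem.Chars.isalnum c
    · set st := l.foldl pvBStep (PySem.Dict.empty, 0) with hst
      set ch := PySem.Chars.lowerChar c with hch
      have hfilt : pvFilt (l ++ [c]) = pvFilt l ++ [ch] := by
        rw [pvFilt_append_singleton]; simp [hal, hch]
      by_cases hmem : ch ∈ pvFilt l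
      · -- repeated character: modify
        have hcont : st.1.contains ch = true := by
          rw [PySem.Dict.contains_iff_mem_keys, hkeys, PySem.Set.mem_ofList]; exact hmem
        have hstep : (pvBStep st c) =
            (st.1.modify ch (0, 0) (fun p => (p.1 + 1, p.2)), st.2 + 1) := by
          simp only [pvBStep, hal, if_true, ← hch, hcont]
        rw [hstep, hfilt]
        refine ⟨?_, ?_, ?_⟩
        · simp [hi]
        · rw [PySem.Dict.keys_modify, PySem.Dict.keys_insert_of_contains st.1 _ hcont,
            hkeys, PySem.Set.ofList_append_singleton,
            PySem.Set.add_of_mem (by rw [PySem.Set.mem_ofList]; exact hmem)]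
        · intro k hk
          have hkfl : k ∈ pvFilt l := by
            rcases List.mem_append.mp hk with h | h
            · exact h
            · simp at h; subst h; exact hmem
          rw [PySem.Dict.getD_modify]
          by_cases hkc : k = ch
          · subst hkc
            rw [if_pos rfl, hget ch hkfl, List.count_append, List.idxOf_append_of_mem hkfl]
            simp [List.count_singleton']
          · rw [if_neg hkc, hget k hkfl, List.count_append, List.idxOf_append_of_mem hkfl]
            simp [Ne.symm hkc]
      · -- fresh character: insert (1, i)
        have hcont : st.1.contains ch = false := by
          rw [Bool.eq_false_iff]
          intro hc
          exact hmem (by rw [← PySem.Set.mem_ofList, ← hkeys,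
            ← PySem.Dict.contains_iff_mem_keys]; exact hc)
        have hstep : (pvBStep st c) = (st.1.insert ch (1, st.2), st.2 + 1) := by
          simp only [pvBStep, hal, if_true, ← hch, hcont, Bool.false_eq_true, if_false]
        rw [hstep, hfilt]
        refine ⟨?_, ?_, ?_⟩
        · simp [hi]
        · rw [PySem.Dict.keys_insert_of_not_contains st.1 _ hcont, hkeys,
            PySem.Set.ofList_append_singleton,
            PySem.Set.add_of_not_mem (by rw [PySem.Set.mem_ofList]; exact hmem)]
        · intro k hk
          rw [PySem.Dict.getD_insert]
          by_cases hkc : k = ch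
          · subst hkc
            rw [if_pos rfl, hi, List.count_append, List.idxOf_append_of_notMem hmem]
            simp [List.count_eq_zero.mpr hmem]
          · have hkfl : k ∈ pvFilt l := by
              rcases List.mem_append.mp hk with h | h
              · exact h
              · simp at h; exact absurd h hkc
            rw [if_neg hkc, hget k hkfl, List.count_append, List.idxOf_append_of_mem hkfl]
            simp [Ne.symm hkc]
    · have hstep : (pvBStep (l.foldl pvBStep (PySem.Dict.empty, 0)) c) =
          l.foldl pvBStep (PySem.Dict.empty, 0) := by simp [pvBStep, hal]
      have hfilt : pvFilt (l ++ [c]) = pvFilt l := by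
        rw [pvFilt_append_singleton]; simp [hal]
      rw [hstep, hfilt]
      exact ⟨hi, hkeys, hget⟩

-- A's counting loop is Counter(t)
lemma pvAfold_eq_counter (t : List Char) :
    (PySem.List.enumerate t).foldl
      (fun d p =>
        if d.contains p.2 then d.insert p.2 (d.getD p.2 0 + 1) else d.insert p.2 1)
      (PySem.Dict.empty : PySem.Dict Char Int) = PySem.Dict.counter t := by
  have h1 : ∀ (u : List Char) (d : PySem.Dict Char Int),
      u.foldl (fun d c => if d.contains c then d.insert c (d.getD c 0 + 1) else d.insert c 1) d
        = u.foldl (fun d c => d.insert c (d.getD c 0 + 1)) d := by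
    intro u
    induction u with
    | nil => intro d; rfl
    | cons c u ih =>
      intro d
      simp only [List.foldl_cons]
      by_cases h : d.contains c
      · rw [if_pos h]; exact ih _
      · rw [if_neg h, PySem.Dict.getD_of_not_contains d 0 (by simpa using h)]
        exact ih _
  calc (PySem.List.enumerate t).foldl
        (fun d p => if d.contains p.2 then d.insert p.2 (d.getD p.2 0 + 1) else d.insert p.2 1)
        (PySem.Dict.empty : PySem.Dict Char Int)
      = ((PySem.List.enumerate t).map (·.2)).foldl
          (fun d c => if d.contains c then d.insert c (d.getD c 0 + 1) else d.insert c 1)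
          (PySem.Dict.empty : PySem.Dict Char Int) := by rw [List.foldl_map]
    _ = t.foldl (fun d c => if d.contains c then d.insert c (d.getD c 0 + 1) else d.insert c 1)
          (PySem.Dict.empty : PySem.Dict Char Int) := by rw [PySem.List.map_snd_enumerate]
    _ = t.foldl (fun d c => d.insert c (d.getD c 0 + 1)) (PySem.Dict.empty : PySem.Dict Char Int) := h1 t _
    _ = PySem.Dict.counter t := PySem.Dict.foldl_insert_getD_add_one_eq_counter t

lemma pvFindIdxA_none (l : List Char) (i : Int) : pvFindIdxA l none i = none := by
  induction l generalizing i with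
  | nil => rfl
  | cons c rest ih => simp [pvFindIdxA, ih]

lemma pvFindIdxA_some (l : List Char) (k : Char) (i : Int) (h : k ∈ l) :
    pvFindIdxA l (some k) i = some (i + (l.idxOf k : Int)) := by
  induction l generalizing i with
  | nil => cases h
  | cons c rest ih =>
    by_cases hck : c = k
    · subst hck; simp [pvFindIdxA]
    · have hk : k ∈ rest := by rcases List.mem_cons.mp h with h' | h' <;> [exact absurd h'.symm hck; exact h']
      rw [pvFindIdxA, if_neg (by simp [hck]), ih _ hk, List.idxOf_cons_ne _ (by simp [hck])]
      congr 1; push_cast; ring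

-- the two selection loops stay in lock-step over any key list drawn from t
lemma pvSelRel (t : List Char) (ks : List Char) (hks : ∀ k ∈ ks, k ∈ t) :
    ∀ (m : Int) (oc : Option Char) (b : Option (Int × Int)),
    ((oc = none ∧ m = 0 ∧ b = none) ∨
      (∃ k0, k0 ∈ t ∧ oc = some k0 ∧ b = some (m, (t.idxOf k0 : Int)))) →
    (let rA := ks.foldl
        (fun st k => if ((t.count k : Int)) > st.1 then (((t.count k : Int)), some k) else st) (m, oc)
     let rB := ks.foldl
        (fun b k => match b with
          | none => some (((t.count k : Int)), ((t.idxOf k : Int)))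
          | some q => if ((t.count k : Int)) > q.1
              then some (((t.count k : Int)), ((t.idxOf k : Int))) else b) b
     (rA.2 = none ∧ rA.1 = 0 ∧ rB = none) ∨
      (∃ k0, k0 ∈ t ∧ rA.2 = some k0 ∧ rB = some (rA.1, (t.idxOf k0 : Int)))) := by
  induction ks with
  | nil => intro m oc b h; exact h
  | cons k ks ih =>
    intro m oc b h
    have hkt : k ∈ t := hks k (List.mem_cons_self)
    have hks' : ∀ k' ∈ ks, k' ∈ t := fun k' hk' => hks k' (List.mem_cons_of_mem _ hk')
    simp only [List.foldl_cons]
    rcases h with ⟨hoc, hm, hb⟩ | ⟨k0, hk0, hoc, hb⟩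
    · subst hoc; subst hm; subst hb
      have hpos : ((t.count k : Int)) > 0 := by
        have := List.count_pos_iff.mpr hkt; omega
      rw [if_pos hpos]
      exact ih hks' _ _ _ (Or.inr ⟨k, hkt, rfl, rfl⟩)
    · subst hoc; subst hb
      by_cases hc : ((t.count k : Int)) > m
      · rw [if_pos hc]
        simp only [hc, if_pos]
        exact ih hks' _ _ _ (Or.inr ⟨k, hkt, rfl, rfl⟩)
      · rw [if_neg hc]
        simp only [hc]
        exact ih hks' _ _ _ (Or.inr ⟨k0, hk0, rfl, rfl⟩)

-- ===== VERDICT (by name: the statement is the Claim_ definition above) =====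
theorem find_max_occurrence_spec : Claim_equal_find_max_occurrence := by
  intro s _
  unfold Spec_find_max_occurrence find_max_occurrence find_max_occurrence_alt
  simp only []
  set t : List Char := (s.toList.filter (fun c => PySem.Chars.isalnum c)).map PySem.Chars.lowerChar with ht
  have htf : t = pvFilt s.toList := rfl
  -- B's table
  obtain ⟨hi, hkeys, hget⟩ := pvBfold_spec s.toList
  have hnodup : (s.toList.foldl pvBStep (PySem.Dict.empty, 0)).1.keys.Nodup := by
    rw [hkeys]; exact PySem.Set.nodup_ofList _
  have hvals : (s.toList.foldl pvBStep (PySem.Dict.empty, 0)).1.values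
      = (PySem.Set.ofList t).map
          (fun k => (((t.count k : Int)), ((t.idxOf k : Int)))) := by
    rw [PySem.Dict.values_eq_map_keys _ hnodup (0, 0), hkeys, ← htf]
    exact List.map_congr_left (fun k hk => hget k (by rwa [← htf, ← PySem.Set.mem_ofList]))
  -- A's counter
  rw [pvAfold_eq_counter t]
  rw [show (PySem.Dict.counter t).items
      = (PySem.Set.ofList t).map (fun k => (k, (t.count k : Int))) from PySem.Dict.items_counter t]
  rw [show (fun (st : PySem.Dict Char (Int × Int) × Int) (c : Char) =>
        if PySem.Chars.isalnum c then
          (if st.1.contains (PySem.Chars.lowerChar c) then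
              st.1.modify (PySem.Chars.lowerChar c) (0, 0) (fun p => (p.1 + 1, p.2))
           else st.1.insert (PySem.Chars.lowerChar c) (1, st.2), st.2 + 1)
        else st) = pvBStep from rfl]
  rw [hvals]
  simp only [List.foldl_map]
  have := pvSelRel t (PySem.Set.ofList t)
    (fun k hk => (PySem.Set.mem_ofList _ _).mp hk) 0 none none (Or.inl ⟨rfl, rfl, rfl⟩)
  simp only [] at this
  rcases this with ⟨hA, _, hB⟩ | ⟨k0, hk0, hA, hB⟩
  · rw [hA, hB, pvFindIdxA_none]; rfl
  · rw [hA, hB, pvFindIdxA_some t k0 0 hk0]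
    simp
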